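-- pv_equiv track=rewrite | github.com/Yokesh-R-B/data-structures-algorithms | Array/check_equal_arrays/Solution.py | checkEqual
-- ===== SOURCE A (Python) =====
-- def checkEqual(a, b) -> bool:
--     #code here
--
--     check = {}
--
--     for x in a:
--         check[x] = check.get(x,0) + 1
--
--     for y in b:
--         if(y not in check):
--             return False
--
--         check[y] -=1
--
--         if(check[y] < 0):
--             return False
--
--     return True
-- ===== SOURCE B (Python) =====
-- def checkEqual(a, b) -> bool:
--     # alternative: sort both lists, then a recursive merge scan checks that
--     # sorted(b) embeds greedily into sorted(a), i.e. b is a sub-multiset of a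
--     # (deliberately not an equality of the sorted lists: A accepts b being a
--     # proper sub-multiset of a, since it never compares lengths)
--     def sub(sa, sb):
--         if not sb:
--             return True
--         if not sa:
--             return False
--         if sa[0] < sb[0]:
--             return sub(sa[1:], sb)
--         if sa[0] == sb[0]:
--             return sub(sa[1:], sb[1:])
--         return False
--     return sub(sorted(a), sorted(b))
-- ===== Notes on version B (the rewrite author's own statement) =====
-- stated objective: alternative
-- what changed: Replaces A's tally-dict build-then-decrement control flow by a sort-then-merge algorithm: sort both lists and do a recursive two-pointer greedy scan that checks sorted(b) embeds into sorted(a), which holds exactly when b is a sub-multiset of a (no length check, matching A's acceptance of proper sub-multisets).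
import Mathlib
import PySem

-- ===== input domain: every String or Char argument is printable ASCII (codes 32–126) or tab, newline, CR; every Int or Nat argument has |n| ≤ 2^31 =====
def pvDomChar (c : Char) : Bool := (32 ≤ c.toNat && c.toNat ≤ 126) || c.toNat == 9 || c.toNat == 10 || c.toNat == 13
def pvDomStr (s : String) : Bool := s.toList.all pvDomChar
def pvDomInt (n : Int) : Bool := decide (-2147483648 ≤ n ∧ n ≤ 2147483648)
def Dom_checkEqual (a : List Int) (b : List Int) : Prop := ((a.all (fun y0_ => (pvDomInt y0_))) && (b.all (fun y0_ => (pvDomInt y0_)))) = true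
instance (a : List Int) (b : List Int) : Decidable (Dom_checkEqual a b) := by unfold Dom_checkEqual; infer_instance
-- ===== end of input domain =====

-- B replaces A's tally-dict build-then-decrement loop by sort-both-then-greedy-merge-scan (objective: alternative algorithm).

-- ===== PORT A =====
-- the second Python loop: early-return scan over b decrementing the tally dict
def checkEqualLoop (d : PySem.Dict Int Int) : List Int → Bool
  | [] => true
  | y :: tl =>
    if ¬ d.contains y then false
    else
      let d' := d.insert y (d.getD y 0 - 1)   -- check[y] -= 1 (y is present, so getD is exact)
      if d'.getD y 0 < 0 then false else checkEqualLoop d' tl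

def checkEqual (a : List Int) (b : List Int) : Bool :=
  let check := a.foldl (fun d x => d.insert x (d.getD x 0 + 1)) PySem.Dict.empty
  checkEqualLoop check b

-- ===== PORT B =====
-- Source B's inner recursive helper sub(sa, sb): greedy merge scan of two sorted lists
def subScan : List Int → List Int → Bool
  | _, [] => true
  | [], _ :: _ => false
  | x :: sa, y :: sb =>
    if x < y then subScan sa (y :: sb)
    else if x = y then subScan sa sb
    else false

def checkEqual_alt (a : List Int) (b : List Int) : Bool :=
  subScan (PySem.List.sorted a (fun x => x) false) (PySem.List.sorted b (fun x => x) false)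

-- ===== PRECONDITION & SPEC =====
def Spec_checkEqual (a : List Int) (b : List Int) (out : Bool) : Prop := out = checkEqual_alt a b
instance (a : List Int) (b : List Int) (out : Bool) : Decidable (Spec_checkEqual a b out) := by unfold Spec_checkEqual; infer_instance

-- ===== CLAIM (what is proved, stated in full; the proofs are below) =====
def Claim_equal_checkEqual : Prop := ∀ (a : List Int) (b : List Int), Dom_checkEqual a b → Spec_checkEqual a b (checkEqual a b)

-- ===== LEMMAS AND PROOFS =====

-- A-side loop characterisation: the scan succeeds iff every element of bs is a key of d
-- and its multiplicity in bs does not exceed its tally in d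
theorem checkEqualLoop_iff (bs : List Int) (d : PySem.Dict Int Int) :
    checkEqualLoop d bs = true ↔
      ∀ y ∈ bs, d.contains y = true ∧ (bs.count y : Int) ≤ d.getD y 0 := by
  induction bs generalizing d with
  | nil => simp [checkEqualLoop]
  | cons y tl ih =>
    simp only [checkEqualLoop]
    by_cases hc : d.contains y = true
    · rw [if_neg (by simp [hc])]
      rw [PySem.Dict.getD_insert_self]
      by_cases hneg : d.getD y 0 - 1 < 0
      · rw [if_pos hneg]
        constructor
        · intro h; simp at h
        · intro h
          have h2 := (h y (by simp)).2
          have hcnt : ((y :: tl).count y : Int) = (tl.count y : Int) + 1 := by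
            push_cast [List.count_cons_self]; ring
          omega
      · rw [if_neg hneg, ih]
        constructor
        · intro h z hz
          by_cases hzy : z = y
          · subst hzy
            refine ⟨hc, ?_⟩
            have hcnt : ((z :: tl).count z : Int) = (tl.count z : Int) + 1 := by
              push_cast [List.count_cons_self]; ring
            by_cases hyt : z ∈ tl
            · have h2 := (h z hyt).2
              rw [PySem.Dict.getD_insert_self] at h2
              omega
            · have h0 : tl.count z = 0 := List.count_eq_zero_of_not_mem hyt
              omega
          · have hz' : z ∈ tl := List.mem_of_ne_of_mem hzy hz
            have h2 := h z hz'
            rw [PySem.Dict.getD_insert_of_ne _ _ _ hzy, PySem.Dict.contains_insert] at h2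
            refine ⟨?_, ?_⟩
            · simpa [hzy] using h2.1
            · have hcnt : ((y :: tl).count z : Int) = (tl.count z : Int) := by
                simp [Ne.symm hzy]
              have h3 := h2.2
              omega
        · intro h z hz
          by_cases hzy : z = y
          · subst hzy
            refine ⟨by simp, ?_⟩
            rw [PySem.Dict.getD_insert_self]
            have h2 := (h z (by simp)).2
            have hcnt : ((z :: tl).count z : Int) = (tl.count z : Int) + 1 := by
              push_cast [List.count_cons_self]; ring
            omega
          · have h2 := h z (List.mem_cons_of_mem _ hz)
            refine ⟨?_, ?_⟩
            · rw [PySem.Dict.contains_insert]; simp [h2.1]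
            · rw [PySem.Dict.getD_insert_of_ne _ _ _ hzy]
              have hcnt : ((y :: tl).count z : Int) = (tl.count z : Int) := by
                simp [Ne.symm hzy]
              have h3 := h2.2
              omega
    · rw [if_pos (by simp [hc])]
      constructor
      · intro h; simp at h
      · intro h
        have h1 := (h y (by simp)).1
        exact absurd h1 hc

-- A's result is exactly the sub-multiset condition on counts
theorem checkEqual_eq_count (a b : List Int) :
    checkEqual a b = true ↔ ∀ y ∈ b, (b.count y : Int) ≤ (a.count y : Int) := by
  unfold checkEqual
  rw [PySem.Dict.foldl_insert_getD_add_one_eq_counter, checkEqualLoop_iff]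
  constructor
  · intro h y hy
    have := (h y hy).2
    rwa [PySem.Dict.getD_counter] at this
  · intro h y hy
    refine ⟨?_, ?_⟩
    · rw [PySem.Dict.contains_counter]
      have hb : 1 ≤ b.count y := List.one_le_count_iff.mpr hy
      have hab := h y hy
      have ha : 1 ≤ a.count y := by
        have h1 : (1 : Int) ≤ (b.count y : Int) := by exact_mod_cast hb
        have h2 : (1 : Int) ≤ (a.count y : Int) := le_trans h1 hab
        exact_mod_cast h2
      have hmem : y ∈ a := List.one_le_count_iff.mp ha
      simpa using hmem
    · rw [PySem.Dict.getD_counter]; exact h y hy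

-- count condition ↔ subperm
theorem checkEqual_iff_subperm (a b : List Int) :
    checkEqual a b = true ↔ List.Subperm b a := by
  rw [checkEqual_eq_count, List.subperm_iff_count]
  constructor
  · intro h y
    by_cases hy : y ∈ b
    · have := h y hy; exact_mod_cast this
    · simp [List.count_eq_zero_of_not_mem hy]
  · intro h y _
    exact_mod_cast h y

-- B-side: on sorted lists the greedy merge scan decides the sublist relation
theorem subScan_iff_sublist (sa sb : List Int)
    (ha : sa.Pairwise (· ≤ ·)) (hb : sb.Pairwise (· ≤ ·)) :
    subScan sa sb = true ↔ sb.Sublist sa := by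
  induction sa generalizing sb with
  | nil =>
    cases sb with
    | nil => simp [subScan]
    | cons y tl => simp [subScan]
  | cons x ta iha =>
    cases sb with
    | nil => simp [subScan]
    | cons y tb =>
      have hta : ta.Pairwise (· ≤ ·) := ha.tail
      have htb : tb.Pairwise (· ≤ ·) := hb.tail
      simp only [subScan]
      by_cases hlt : x < y
      · rw [if_pos hlt, iha (y :: tb) hta hb]
        constructor
        · intro h; exact h.cons x
        · intro h
          cases h with
          | cons _ h' => exact h'
          | cons₂ _ h' => omega
      · rw [if_neg hlt]
        by_cases heq : x = y
        · subst heq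
          rw [if_pos rfl, iha tb hta htb]
          exact (List.cons_sublist_cons).symm
        · rw [if_neg heq]
          have hgt : y < x := by omega
          constructor
          · intro h; simp at h
          · intro h
            have hy : y ∈ x :: ta := h.subset (List.mem_cons_self)
            have : x ≤ y := by
              rcases List.mem_cons.mp hy with h1 | h1
              · omega
              · exact List.rel_of_pairwise_cons ha h1
            omega

theorem checkEqual_alt_iff_subperm (a b : List Int) :
    checkEqual_alt a b = true ↔ List.Subperm b a := by
  unfold checkEqual_alt
  have hpa : (PySem.List.sorted a (fun x => x) false).Perm a := PySem.List.sorted_perm a _ _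
  have hpb : (PySem.List.sorted b (fun x => x) false).Perm b := PySem.List.sorted_perm b _ _
  have hsa : (PySem.List.sorted a (fun x => x) false).Pairwise (· ≤ ·) := by
    simpa using PySem.List.sorted_pairwise a (fun x => x)
  have hsb : (PySem.List.sorted b (fun x => x) false).Pairwise (· ≤ ·) := by
    simpa using PySem.List.sorted_pairwise b (fun x => x)
  rw [subScan_iff_sublist _ _ hsa hsb]
  constructor
  · intro h
    exact hpb.symm.subperm.trans ((h.subperm).trans hpa.subperm)
  · intro h
    have h' : List.Subperm (PySem.List.sorted b (fun x => x) false) (PySem.List.sorted a (fun x => x) false) :=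
      (hpb.subperm.trans h).trans hpa.symm.subperm
    exact List.sublist_of_subperm_of_pairwise h' hsb hsa

-- ===== VERDICT (by name: the statement is the Claim_ definition above) =====
theorem checkEqual_spec : Claim_equal_checkEqual := by
  intro a b _
  unfold Spec_checkEqual
  have h1 := checkEqual_iff_subperm a b
  have h2 := checkEqual_alt_iff_subperm a b
  cases ha : checkEqual a b <;> cases hb : checkEqual_alt a b <;> simp_all
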